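-- pv_equiv track=rewrite | github.com/SysKui/lava | lava_dispatcher/actions/boot/qemu.py | can_support_panic_count
-- ===== SOURCE A (Python) =====
-- from typing import TYPE_CHECKING, List
--
-- def can_support_panic_count(cmd_list: List[str]):
--     """
--     Check if the boot params support the panic count feature
--
--     For example: '-device pvpanic-pci', '-qmp unix:/tmp/qmp.sock,server=off,wait=no',
--     '-action shutdown=pause,panic=none' and '-s' can support the feature
--     """
--     found_pvpanic = (
--         "pvpanic-pci" in cmd_list and "shutdown=pause,panic=none" in cmd_list
--     )
--
--     found_gdb = "-gdb" in cmd_list or "-s" in cmd_list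
--
--     found_qmp = False
--     for cmd in cmd_list:
--         if "mode=control" in cmd or "-qmp" in cmd:
--             found_qmp = True
--
--     is_valid = found_qmp and found_gdb and found_pvpanic
--
--     return is_valid
-- ===== SOURCE B (Python) =====
-- def can_support_panic_count(cmd_list):
--     """Worklist re-implementation: keep a pending list of four named
--     requirements and filter it down while walking cmd_list, returning True
--     as soon as it is empty; at the end succeed iff nothing is pending."""
--
--     def matches(req, cmd):
--         if req == "pvpanic":
--             return cmd == "pvpanic-pci"
--         if req == "panic_none":
--             return cmd == "shutdown=pause,panic=none"
--         if req == "gdb":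
--             return cmd == "-gdb" or cmd == "-s"
--         # req == "qmp"
--         return "mode=control" in cmd or "-qmp" in cmd
--
--     pending = ["pvpanic", "panic_none", "gdb", "qmp"]
--     for cmd in cmd_list:
--         if not pending:
--             return True
--         pending = [r for r in pending if not matches(r, cmd)]
--     return not pending
-- ===== Notes on version B (the rewrite author's own statement) =====
-- stated objective: alternative
-- what changed: Replaces A's fixed boolean expression over five separate scans with a requirement-worklist recursion: a pending list of four named requirements is filtered down while traversing cmd_list once, returning True as soon as it is empty and False if commands run out first.
import Mathlib
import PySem

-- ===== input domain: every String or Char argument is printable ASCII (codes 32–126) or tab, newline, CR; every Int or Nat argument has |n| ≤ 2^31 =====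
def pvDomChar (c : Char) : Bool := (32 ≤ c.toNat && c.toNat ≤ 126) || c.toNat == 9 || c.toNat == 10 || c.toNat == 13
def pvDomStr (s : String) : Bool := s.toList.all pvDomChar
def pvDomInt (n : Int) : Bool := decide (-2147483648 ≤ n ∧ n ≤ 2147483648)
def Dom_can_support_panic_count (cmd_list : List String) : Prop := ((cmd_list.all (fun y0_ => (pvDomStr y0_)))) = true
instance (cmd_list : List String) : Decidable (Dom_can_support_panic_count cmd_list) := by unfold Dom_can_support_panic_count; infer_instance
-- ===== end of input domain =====

-- ===== PORT A =====
-- B replaces A's five separate scans with a requirement-worklist recursion (alternative decomposition).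
def can_support_panic_count (cmd_list : List String) : Bool :=
  let found_pvpanic := cmd_list.contains "pvpanic-pci" && cmd_list.contains "shutdown=pause,panic=none"
  let found_gdb := cmd_list.contains "-gdb" || cmd_list.contains "-s"
  let found_qmp := cmd_list.foldl
    (fun acc cmd => if PySem.Str.isIn "mode=control" cmd || PySem.Str.isIn "-qmp" cmd then true else acc)
    false
  found_qmp && found_gdb && found_pvpanic

-- ===== PORT B =====
def pvMatches (req cmd : String) : Bool :=
  if req == "pvpanic" then cmd == "pvpanic-pci"
  else if req == "panic_none" then cmd == "shutdown=pause,panic=none"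
  else if req == "gdb" then cmd == "-gdb" || cmd == "-s"
  else PySem.Str.isIn "mode=control" cmd || PySem.Str.isIn "-qmp" cmd

def pvGo : List String → List String → Bool
  | [], pending => pending.isEmpty
  | c :: cs, pending =>
    if pending.isEmpty then true
    else pvGo cs (pending.filter (fun r => !pvMatches r c))

def can_support_panic_count_alt (cmd_list : List String) : Bool :=
  pvGo cmd_list ["pvpanic", "panic_none", "gdb", "qmp"]

-- ===== PRECONDITION & SPEC =====
def Spec_can_support_panic_count (cmd_list : List String) (out : Bool) : Prop := out = can_support_panic_count_alt cmd_list
instance (cmd_list : List String) (out : Bool) : Decidable (Spec_can_support_panic_count cmd_list out) := by unfold Spec_can_support_panic_count; infer_instance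

-- ===== CLAIM (what is proved, stated in full; the proofs are below) =====
def Claim_equal_can_support_panic_count : Prop := ∀ (cmd_list : List String), Dom_can_support_panic_count cmd_list → Spec_can_support_panic_count cmd_list (can_support_panic_count cmd_list)

-- ===== LEMMAS AND PROOFS =====

lemma all_filter_not (c : String) (cs : List String) (pending : List String) :
    (pending.filter (fun r => !pvMatches r c)).all (fun r => cs.any (fun x => pvMatches r x)) =
    pending.all (fun r => pvMatches r c || cs.any (fun x => pvMatches r x)) := by
  induction pending with
  | nil => rfl
  | cons q qs ih =>
    by_cases h : pvMatches q c = true <;>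
      simp [List.filter_cons, List.all_cons, h, ih]

lemma pvGo_eq (cmds pending : List String) :
    pvGo cmds pending = pending.all (fun r => cmds.any (fun c => pvMatches r c)) := by
  induction cmds generalizing pending with
  | nil =>
    cases pending with
    | nil => rfl
    | cons q qs => simp [pvGo]
  | cons c cs ih =>
    cases pending with
    | nil => rfl
    | cons q qs =>
      show pvGo cs ((q :: qs).filter (fun r => !pvMatches r c)) = _
      rw [ih, all_filter_not]
      simp [List.all_cons, List.any_cons]
  

lemma foldl_if_any (p : String → Bool) (l : List String) (acc : Bool) :
    l.foldl (fun acc cmd => if p cmd then true else acc) acc = (acc || l.any p) := by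
  induction l generalizing acc with
  | nil => simp
  | cons x xs ih =>
    simp only [List.foldl_cons, List.any_cons, ih]
    by_cases h : p x = true <;> simp [h]

lemma contains_eq_any (l : List String) (a : String) :
    l.contains a = l.any (fun cmd => cmd == a) := by
  induction l with
  | nil => rfl
  | cons x xs ih =>
    simp only [List.contains_cons, List.any_cons, ← ih]
    by_cases h : a = x
    · simp [h]
    · have h1 : (a == x) = false := by simp [h]
      have h2 : (x == a) = false := by simp [Ne.symm h]
      simp [h1, h2]

lemma pvMatches_pvpanic (cmd : String) : pvMatches "pvpanic" cmd = (cmd == "pvpanic-pci") := rfl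
lemma pvMatches_panic_none (cmd : String) : pvMatches "panic_none" cmd = (cmd == "shutdown=pause,panic=none") := rfl
lemma pvMatches_gdb (cmd : String) : pvMatches "gdb" cmd = (cmd == "-gdb" || cmd == "-s") := rfl
lemma pvMatches_qmp (cmd : String) :
    pvMatches "qmp" cmd = (PySem.Str.isIn "mode=control" cmd || PySem.Str.isIn "-qmp" cmd) := rfl

-- ===== VERDICT (by name: the statement is the Claim_ definition above) =====
theorem can_support_panic_count_spec : Claim_equal_can_support_panic_count := by
  intro cmd_list _
  unfold Spec_can_support_panic_count can_support_panic_count can_support_panic_count_alt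
  rw [pvGo_eq]
  simp only [List.all_cons, List.all_nil, pvMatches_pvpanic, pvMatches_panic_none,
    pvMatches_gdb, pvMatches_qmp, foldl_if_any, contains_eq_any, Bool.false_or, Bool.and_true]
  have hor : ∀ (p q : String → Bool) (l : List String),
      l.any (fun c => p c || q c) = (l.any p || l.any q) := by
    intro p q l; induction l with
    | nil => rfl
    | cons x xs ih => simp [List.any_cons, ih, Bool.or_assoc, Bool.or_left_comm]
  simp only [hor]
  simp only [Bool.and_comm, Bool.and_assoc, Bool.and_left_comm]
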